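-- pv_equiv track=rewrite | github.com/aizpurua23a/aoc20 | 18/main.py | get_last_occurrence_of_operator_at_surface_level
-- ===== SOURCE A (Python) =====
-- def get_last_occurrence_of_operator_at_surface_level(operator, str_list):
--     depth = 0
--     for index, element in enumerate(str_list[::-1]):
--         if element == ')':
--             depth += 1
--         if element == '(':
--             depth -= 1
--
--         if depth == 0 and element == operator:
--             return -1 - index
--     return None
-- ===== SOURCE B (Python) =====
-- def get_last_occurrence_of_operator_at_surface_level(operator, str_list):
--     total = sum(1 if e == ')' else -1 if e == '(' else 0 for e in str_list)
--     n = len(str_list)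
--     p = 0
--     candidate = None
--     for i, element in enumerate(str_list):
--         if p == total and element == operator:
--             candidate = i - n
--         p += 1 if element == ')' else -1 if element == '(' else 0
--     return candidate
-- ===== Notes on version B (the rewrite author's own statement) =====
-- stated objective: alternative
-- what changed: Replaces the reversed scan with early return and running depth by a single forward pass: the paren-weight total is precomputed, a running prefix sum is compared against it, and the last matching index (as index - len) wins.
import Mathlib
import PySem

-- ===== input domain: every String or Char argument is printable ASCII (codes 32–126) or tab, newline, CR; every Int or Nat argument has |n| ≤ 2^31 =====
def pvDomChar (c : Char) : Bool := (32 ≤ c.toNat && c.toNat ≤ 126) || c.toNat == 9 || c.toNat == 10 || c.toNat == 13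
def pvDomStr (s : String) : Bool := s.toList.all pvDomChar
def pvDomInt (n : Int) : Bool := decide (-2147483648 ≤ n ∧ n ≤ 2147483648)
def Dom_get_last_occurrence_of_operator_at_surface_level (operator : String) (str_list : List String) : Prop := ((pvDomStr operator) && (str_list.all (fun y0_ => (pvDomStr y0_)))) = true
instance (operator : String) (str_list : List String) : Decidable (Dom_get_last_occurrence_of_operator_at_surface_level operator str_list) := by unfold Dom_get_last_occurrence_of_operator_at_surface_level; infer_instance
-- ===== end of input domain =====

-- B replaces A's reverse-scan-with-early-return by a single forward pass with a precomputed
-- paren-weight total and a running prefix sum (last match wins); same return value, alternative decomposition.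


-- ===== PORT A =====
-- the for-loop with early return, over str_list[::-1] (= List.reverse, exact for step -1 full slice)
def goA (operator : String) (depth : Int) (index : Int) : List String → Option Int
  | [] => none
  | element :: rest =>
    let d1 := if element == ")" then depth + 1 else depth
    let d2 := if element == "(" then d1 - 1 else d1
    if d2 == 0 && element == operator then some (-1 - index)
    else goA operator d2 (index + 1) rest

def get_last_occurrence_of_operator_at_surface_level (operator : String) (str_list : List String) : Option Int :=
  goA operator 0 0 str_list.reverse

-- ===== PORT B =====
-- weight of one token: the conditional expression `1 if e == ')' else -1 if e == '(' else 0`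
def weightB (e : String) : Int := if e == ")" then 1 else if e == "(" then -1 else 0

def get_last_occurrence_of_operator_at_surface_level_alt (operator : String) (str_list : List String) : Option Int :=
  let total := (str_list.map weightB).sum
  let n : Int := str_list.length
  (((PySem.List.enumerate str_list 0).foldl
    (fun (st : Int × Option Int) (ie : Int × String) =>
      (st.1 + weightB ie.2,
       if st.1 == total && ie.2 == operator then some (ie.1 - n) else st.2))
    (0, none))).2

-- ===== PRECONDITION & SPEC =====
def Spec_get_last_occurrence_of_operator_at_surface_level (operator : String) (str_list : List String) (out : Option Int) : Prop := out = get_last_occurrence_of_operator_at_surface_level_alt operator str_list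
instance (operator : String) (str_list : List String) (out : Option Int) : Decidable (Spec_get_last_occurrence_of_operator_at_surface_level operator str_list out) := by unfold Spec_get_last_occurrence_of_operator_at_surface_level; infer_instance

-- ===== CLAIM (what is proved, stated in full; the proofs are below) =====
def Claim_equal_get_last_occurrence_of_operator_at_surface_level : Prop := ∀ (operator : String) (str_list : List String), Dom_get_last_occurrence_of_operator_at_surface_level operator str_list → Spec_get_last_occurrence_of_operator_at_surface_level operator str_list (get_last_occurrence_of_operator_at_surface_level operator str_list)

-- ===== LEMMAS AND PROOFS =====

-- total paren weight of a token list
def Wsum (l : List String) : Int := (l.map weightB).sum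

theorem Wsum_cons (e : String) (l : List String) : Wsum (e :: l) = weightB e + Wsum l := by
  simp [Wsum]
theorem Wsum_reverse (l : List String) : Wsum l.reverse = Wsum l := by
  simp [Wsum]

-- the two sequential ifs of A compute depth + weightB e
theorem depth_step (e : String) (d : Int) :
    (if e == "(" then (if e == ")" then d + 1 else d) - 1 else (if e == ")" then d + 1 else d))
      = d + weightB e := by
  by_cases h1 : e = "("
  · subst h1; simp [weightB]; ring
  · by_cases h2 : e = ")"
    · subst h2; simp [weightB]
    · simp [weightB, h1, h2]

-- A's loop on s ++ [e]: first the loop on s, then one final step at depth d + Wsum s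
theorem goA_append (op e : String) : ∀ (s : List String) (d idx : Int),
    goA op d idx (s ++ [e]) =
      (match goA op d idx s with
       | some v => some v
       | none =>
         if (d + Wsum s + weightB e == 0) && e == op
         then some (-1 - (idx + (s.length : Int))) else none) := by
  intro s
  induction s with
  | nil =>
    intro d idx
    simp only [List.nil_append, goA]
    rw [depth_step e d]
    simp [Wsum]
  | cons a s' ih =>
    intro d idx
    simp only [List.cons_append, goA]
    rw [depth_step a d]
    by_cases hc : ((d + weightB a == 0) && (a == op)) = true
    · simp [hc]
    · rw [if_neg hc, if_neg hc, ih (d + weightB a) (idx + 1)]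
      have h1 : d + weightB a + Wsum s' = d + Wsum (a :: s') := by
        rw [Wsum_cons]; ring
      have h2 : idx + 1 + (s'.length : Int) = idx + ((a :: s').length : Int) := by
        push_cast [List.length_cons]; ring
      rw [h1, h2]

-- main correspondence between B's forward fold and A's reverse loop
theorem main_lemma (op : String) : ∀ (y : List String) (d idx p0 total n m : Int) (cand0 : Option Int),
    p0 + Wsum y - total = -d →
    n = m + idx + (y.length : Int) →
    ((PySem.List.enumerate y m).foldl
      (fun (st : Int × Option Int) (ie : Int × String) =>
        (st.1 + weightB ie.2,
         if st.1 == total && ie.2 == op then some (ie.1 - n) else st.2))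
      (p0, cand0)).2
    = (match goA op d idx y.reverse with
       | some v => some v
       | none => cand0) := by
  intro y
  induction y with
  | nil =>
    intro d idx p0 total n m cand0 _ _
    simp [PySem.List.enumerate_nil, goA]
  | cons e rest ih =>
    intro d idx p0 total n m cand0 hp hn
    rw [PySem.List.enumerate_cons, List.foldl_cons]
    have hrev : (e :: rest).reverse = rest.reverse ++ [e] := by simp
    rw [hrev, goA_append op e rest.reverse d idx]
    rw [ih d idx (p0 + weightB e) total n (m + 1)
        (if p0 == total && e == op then some (m - n) else cand0)
        (by rw [Wsum_cons] at hp; linarith)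
        (by push_cast [List.length_cons] at hn ⊢; linarith)]
    cases hA : goA op d idx rest.reverse with
    | some v => simp
    | none =>
      simp only []
      have hcond : ((d + Wsum rest.reverse + weightB e == 0) = (p0 == total)) := by
        rw [Wsum_reverse, Wsum_cons] at *
        by_cases h : p0 = total
        · subst h
          have : d + Wsum rest + weightB e = 0 := by linarith
          simp [this]
        · have hne : d + Wsum rest + weightB e ≠ 0 := by
            intro h0
            exact h (by linarith)
          simp [hne, h]
      rw [hcond]
      by_cases hc : ((p0 == total) && (e == op)) = true
      · have hv : m - n = -1 - (idx + ((rest.length : Int))) := by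
          push_cast [List.length_cons] at hn; omega
        simp [hc, hv]
      · simp [hc]

-- ===== VERDICT (by name: the statement is the Claim_ definition above) =====
theorem get_last_occurrence_of_operator_at_surface_level_spec : Claim_equal_get_last_occurrence_of_operator_at_surface_level := by
  intro operator str_list _
  unfold Spec_get_last_occurrence_of_operator_at_surface_level
  unfold get_last_occurrence_of_operator_at_surface_level get_last_occurrence_of_operator_at_surface_level_alt
  rw [show (str_list.map weightB).sum = Wsum str_list from rfl]
  rw [main_lemma operator str_list 0 0 0 (Wsum str_list) (str_list.length : Int) 0 none
      (by ring) (by push_cast; ring)]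
  cases goA operator 0 0 str_list.reverse <;> simp
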